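-- pv_equiv track=rewrite | github.com/benderprog/analiz_svodok | apps/analysis/services/semantic.py | split_letter_digit
-- ===== SOURCE A (Python) =====
-- def split_letter_digit(value: str) -> str:
--     if not value:
--         return ""
--     result: list[str] = []
--     prev = ""
--     for char in value:
--         if prev and ((prev.isalpha() and char.isdigit()) or (prev.isdigit() and char.isalpha())):
--             result.append(" ")
--         result.append(char)
--         prev = char
--     return "".join(result)
-- ===== SOURCE B (Python) =====
-- def split_letter_digit(value: str) -> str:
--     # Two-pass: split into maximal same-class runs, then join runs with a
--     # space exactly between an alpha run and a digit run (either order).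
--     def cls(c):
--         if c.isalpha():
--             return "a"
--         if c.isdigit():
--             return "d"
--         return "o"
--
--     runs = []
--     i = 0
--     n = len(value)
--     while i < n:
--         k = cls(value[i])
--         j = i + 1
--         while j < n and cls(value[j]) == k:
--             j += 1
--         runs.append((k, value[i:j]))
--         i = j
--
--     parts = []
--     prev = None
--     for k, text in runs:
--         if prev is not None and ((prev == "a" and k == "d") or (prev == "d" and k == "a")):
--             parts.append(" ")
--         parts.append(text)
--         prev = k
--     return "".join(parts)
-- ===== Notes on version B (the rewrite author's own statement) =====
-- stated objective: alternative
-- what changed: Replaced A's char-by-char scan that tracks the previous character by a two-pass run decomposition: first split the string into maximal alpha/digit/other runs, then a group-level pass that inserts a space exactly between an alpha run and a digit run.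
import Mathlib
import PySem

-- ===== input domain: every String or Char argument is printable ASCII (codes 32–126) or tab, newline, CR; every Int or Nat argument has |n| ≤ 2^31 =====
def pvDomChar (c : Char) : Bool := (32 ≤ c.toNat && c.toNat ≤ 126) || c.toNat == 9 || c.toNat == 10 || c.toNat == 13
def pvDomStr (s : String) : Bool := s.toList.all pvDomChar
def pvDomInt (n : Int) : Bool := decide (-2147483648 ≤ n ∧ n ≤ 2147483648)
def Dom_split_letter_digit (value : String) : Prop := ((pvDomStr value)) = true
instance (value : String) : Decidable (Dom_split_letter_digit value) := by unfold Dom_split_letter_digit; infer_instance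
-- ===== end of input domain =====

-- B replaces A's char-by-char prev-tracking scan by a two-pass run decomposition
-- (maximal alpha/digit/other runs, then a group-level pass inserting the spaces);
-- objective: alternative decomposition, same cost.

-- ===== PORT A =====
-- one step of A's for-loop: state = (result, prev)
def sldStep (st : List String × String) (c : Char) : List String × String :=
  let result :=
    if st.2 ≠ "" ∧ ((PySem.Str.strIsalpha st.2 ∧ PySem.Chars.isdigit c)
        ∨ (PySem.Str.strIsdigit st.2 ∧ PySem.Chars.isalpha c))
    then st.1 ++ [" "] else st.1
  (result ++ [String.ofList [c]], String.ofList [c])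

def split_letter_digit (value : String) : String :=
  if value = "" then ""
  else PySem.Str.join "" (value.toList.foldl sldStep ([], "")).1

-- ===== PORT B =====
-- character class: 'a' alpha, 'd' digit, 'o' other
def sldClass (c : Char) : Char :=
  if PySem.Chars.isalpha c then 'a' else if PySem.Chars.isdigit c then 'd' else 'o'

-- first pass: maximal same-class runs (Source B's inner while = takeWhile/dropWhile)
def sldRuns : List Char → List (Char × List Char)
  | [] => []
  | c :: rest =>
      (sldClass c, c :: rest.takeWhile (fun x => sldClass x == sldClass c))
        :: sldRuns (rest.dropWhile (fun x => sldClass x == sldClass c))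
  termination_by cs => cs.length
  decreasing_by
    have := List.length_dropWhile_le (fun x => sldClass x == sldClass c) rest
    simp only [List.length_cons]; omega

-- second pass: one step of Source B's run-joining loop: state = (parts, prev key)
def sldEmit (st : List Char × Option Char) (r : Char × List Char) : List Char × Option Char :=
  let sep : List Char :=
    match st.2 with
    | some p => if (p = 'a' ∧ r.1 = 'd') ∨ (p = 'd' ∧ r.1 = 'a') then [' '] else []
    | none => []
  (st.1 ++ sep ++ r.2, some r.1)

def split_letter_digit_alt (value : String) : String :=
  String.ofList ((sldRuns value.toList).foldl sldEmit ([], none)).1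

-- ===== PRECONDITION & SPEC =====
def Spec_split_letter_digit (value : String) (out : String) : Prop := out = split_letter_digit_alt value
instance (value : String) (out : String) : Decidable (Spec_split_letter_digit value out) := by unfold Spec_split_letter_digit; infer_instance

-- ===== CLAIM (what is proved, stated in full; the proofs are below) =====
def Claim_equal_split_letter_digit : Prop := ∀ (value : String), Dom_split_letter_digit value → Spec_split_letter_digit value (split_letter_digit value)

-- ===== LEMMAS AND PROOFS =====

-- canonical description: given the previous character a, the text emitted for cs
def bndB (a b : Char) : Bool :=
  (PySem.Chars.isalpha a && PySem.Chars.isdigit b)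
    || (PySem.Chars.isdigit a && PySem.Chars.isalpha b)

def canonFrom (a : Char) : List Char → List Char
  | [] => []
  | c :: rest => (if bndB a c then [' '] else []) ++ c :: canonFrom c rest

theorem sldRuns_nil : sldRuns [] = [] := by rw [sldRuns]

theorem sldRuns_cons (c : Char) (rest : List Char) :
    sldRuns (c :: rest) =
      (sldClass c, c :: rest.takeWhile (fun x => sldClass x == sldClass c))
        :: sldRuns (rest.dropWhile (fun x => sldClass x == sldClass c)) := by
  rw [sldRuns]

theorem sld_alpha_digit_disjoint (c : Char) :
    PySem.Chars.isdigit c = true → PySem.Chars.isalpha c = false := by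
  intro h
  simp only [PySem.Chars.isdigit, Bool.and_eq_true, decide_eq_true_eq] at h
  simp only [PySem.Chars.isalpha, PySem.Chars.isupper, PySem.Chars.islower,
    Bool.or_eq_false_iff, Bool.and_eq_false_iff, decide_eq_false_iff_not]
  constructor
  · left; intro hA; exact absurd (le_trans hA h.2) (by decide)
  · left; intro ha; exact absurd (le_trans ha h.2) (by decide)

theorem bndB_class (a b : Char) :
    bndB a b = ((sldClass a == 'a' && sldClass b == 'd')
      || (sldClass a == 'd' && sldClass b == 'a')) := by
  have da := sld_alpha_digit_disjoint a
  have db := sld_alpha_digit_disjoint b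
  unfold bndB sldClass
  rcases ha : PySem.Chars.isalpha a <;> rcases hb : PySem.Chars.isalpha b <;>
    rcases ha' : PySem.Chars.isdigit a <;> rcases hb' : PySem.Chars.isdigit b <;>
    simp_all

theorem bndB_same_class (a b : Char) (h : sldClass a = sldClass b) : bndB a b = false := by
  rw [bndB_class, h]
  rcases hb : sldClass b == 'a' <;> rcases hd : sldClass b == 'd' <;> simp_all

-- joining with "" just flattens
theorem join_empty_toList (parts : List String) :
    (PySem.Str.join "" parts).toList = (parts.map String.toList).flatten := by
  induction parts with
  | nil => simp [PySem.Str.join, PySem.Chars.join_nil]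
  | cons p rest ih =>
      cases rest with
      | nil => simp [PySem.Str.join, PySem.Chars.join_singleton]
      | cons q t =>
          simp only [PySem.Str.join, String.toList_ofList, List.map_cons] at ih ⊢
          rw [PySem.Chars.join_cons_cons]
          simp_all

theorem strIsalpha_single (c : Char) :
    PySem.Str.strIsalpha (String.ofList [c]) = PySem.Chars.isalpha c := by
  simp [PySem.Str.strIsalpha, PySem.Chars.strIsalpha]

theorem strIsdigit_single (c : Char) :
    PySem.Str.strIsdigit (String.ofList [c]) = PySem.Chars.isdigit c := by
  simp [PySem.Str.strIsdigit, PySem.Chars.strIsdigit]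

theorem ofList_single_ne_empty (c : Char) : String.ofList [c] ≠ "" := by
  intro h
  have : (String.ofList [c]).toList = ("" : String).toList := by rw [h]
  simp at this

-- A's loop, from a single-char prev, emits canonFrom
theorem aLoop_canon (cs : List Char) : ∀ (res : List String) (a : Char),
    (((cs.foldl sldStep (res, String.ofList [a])).1.map String.toList).flatten)
      = ((res.map String.toList).flatten) ++ canonFrom a cs := by
  induction cs with
  | nil => intro res a; simp [canonFrom]
  | cons c rest ih =>
      intro res a
      rw [List.foldl_cons]
      have hstep : sldStep (res, String.ofList [a]) c =
          ((if bndB a c then res ++ [" "] else res) ++ [String.ofList [c]],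
            String.ofList [c]) := by
        simp only [sldStep, bndB, strIsalpha_single, strIsdigit_single,
          ofList_single_ne_empty, ne_eq, not_false_eq_true, true_and]
        have hcond : (PySem.Chars.isalpha a = true ∧ PySem.Chars.isdigit c = true ∨
            PySem.Chars.isdigit a = true ∧ PySem.Chars.isalpha c = true) ↔
            ((PySem.Chars.isalpha a && PySem.Chars.isdigit c
              || PySem.Chars.isdigit a && PySem.Chars.isalpha c) = true) := by
          simp
        rw [if_congr hcond rfl rfl]
        split_ifs <;> rfl
      rw [hstep, ih]
      rcases h : bndB a c <;> simp [canonFrom, h]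

-- canonFrom emits a same-class run verbatim, ending with the run's last char as context
theorem canon_run (run : List Char) : ∀ (c : Char) (rest' : List Char),
    (∀ x ∈ run, sldClass x = sldClass c) →
    canonFrom c (run ++ rest') = run ++ canonFrom ((c :: run).getLast (by simp)) rest' := by
  induction run with
  | nil => intro c rest' _; simp
  | cons x xs ih =>
      intro c rest' h
      have hx : sldClass x = sldClass c := h x (by simp)
      have hxs : ∀ y ∈ xs, sldClass y = sldClass x := fun y hy => (h y (by simp [hy])).trans hx.symm
      rw [List.cons_append]
      show (if bndB c x then [' '] else []) ++ x :: canonFrom x (xs ++ rest') = _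
      rw [bndB_same_class c x hx.symm, ih x rest' hxs]
      simp [List.getLast_cons]

-- B's run-joining loop, with prev key the class of a, emits canonFrom a
theorem bLoop_canon : ∀ (n : ℕ) (cs : List Char), cs.length ≤ n →
    ∀ (parts : List Char) (a : Char),
    ((sldRuns cs).foldl sldEmit (parts, some (sldClass a))).1 = parts ++ canonFrom a cs := by
  intro n
  induction n with
  | zero =>
      intro cs h parts a
      have hcs : cs = [] := List.eq_nil_of_length_eq_zero (Nat.le_zero.mp h)
      subst hcs; simp [sldRuns_nil, canonFrom]
  | succ n ihn =>
      intro cs hlen parts a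
      cases cs with
      | nil => simp [sldRuns_nil, canonFrom]
      | cons c rest =>
        rw [sldRuns_cons, List.foldl_cons]
        have hemit : sldEmit (parts, some (sldClass a))
            (sldClass c, c :: rest.takeWhile (fun x => sldClass x == sldClass c)) =
            (parts ++ (if bndB a c then [' '] else [])
              ++ (c :: rest.takeWhile (fun x => sldClass x == sldClass c)),
              some (sldClass c)) := by
          simp only [sldEmit, bndB_class]
          rcases h1 : sldClass a == 'a' <;> rcases h2 : sldClass a == 'd' <;>
            rcases h3 : sldClass c == 'a' <;> rcases h4 : sldClass c == 'd' <;>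
            simp_all
        rw [hemit]
        have hrunclass : ∀ x ∈ rest.takeWhile (fun x => sldClass x == sldClass c),
            sldClass x = sldClass c := by
          intro x hx
          have := List.mem_takeWhile_imp hx
          simpa using this
        have hlast : sldClass ((c :: rest.takeWhile (fun x => sldClass x == sldClass c)).getLast
            (by simp)) = sldClass c := by
          have hmem := List.getLast_mem
            (l := c :: rest.takeWhile (fun x => sldClass x == sldClass c)) (by simp)
          rcases (List.mem_cons).1 hmem with h | h
          · rw [h]
          · exact hrunclass _ h
        have hd : (rest.dropWhile (fun x => sldClass x == sldClass c)).length ≤ n := by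
          have h1 := List.length_dropWhile_le (fun x => sldClass x == sldClass c) rest
          simp only [List.length_cons] at hlen
          omega
        have hstep2 := ihn (rest.dropWhile (fun x => sldClass x == sldClass c)) hd
          ((parts ++ (if bndB a c then [' '] else []))
            ++ (c :: rest.takeWhile (fun x => sldClass x == sldClass c)))
          ((c :: rest.takeWhile (fun x => sldClass x == sldClass c)).getLast (by simp))
        rw [hlast] at hstep2
        rw [hstep2]
        have hcr : canonFrom c rest =
            rest.takeWhile (fun x => sldClass x == sldClass c)
              ++ canonFrom ((c :: rest.takeWhile (fun x => sldClass x == sldClass c)).getLast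
                (by simp)) (rest.dropWhile (fun x => sldClass x == sldClass c)) := by
          conv_lhs => rw [← List.takeWhile_append_dropWhile
            (p := fun x => sldClass x == sldClass c) (l := rest)]
          exact canon_run _ c _ hrunclass
        show _ = parts ++ canonFrom a (c :: rest)
        rw [show canonFrom a (c :: rest) =
          (if bndB a c then [' '] else []) ++ c :: canonFrom c rest from rfl, hcr]
        simp

theorem toList_empty_iff (s : String) : s.toList = [] ↔ s = "" := by
  constructor
  · intro h
    have := congrArg String.ofList h
    simpa [String.ofList_toList] using this
  · intro h; simp [h]

-- ===== VERDICT (by name: the statement is the Claim_ definition above) =====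
theorem split_letter_digit_spec : Claim_equal_split_letter_digit := by
  intro value _
  show split_letter_digit value = split_letter_digit_alt value
  by_cases hv : value = ""
  · subst hv; simp [split_letter_digit, split_letter_digit_alt, sldRuns_nil]
  · have hne : value.toList ≠ [] := fun h => hv ((toList_empty_iff value).1 h)
    rcases hcs : value.toList with _ | ⟨c, rest⟩
    · exact absurd hcs hne
    · apply String.toList_inj.mp
      rw [split_letter_digit, if_neg hv, split_letter_digit_alt, hcs]
      -- A side
      rw [join_empty_toList, List.foldl_cons]
      have hstep1 : sldStep ([], "") c = ([String.ofList [c]], String.ofList [c]) := by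
        simp [sldStep]
      rw [hstep1, aLoop_canon rest [String.ofList [c]] c]
      -- B side
      rw [sldRuns_cons, List.foldl_cons]
      have hemit : sldEmit ([], none)
          (sldClass c, c :: rest.takeWhile (fun x => sldClass x == sldClass c)) =
          (c :: rest.takeWhile (fun x => sldClass x == sldClass c), some (sldClass c)) := by
        simp [sldEmit]
      rw [hemit]
      have hrunclass : ∀ x ∈ rest.takeWhile (fun x => sldClass x == sldClass c),
          sldClass x = sldClass c := by
        intro x hx
        have := List.mem_takeWhile_imp hx
        simpa using this
      have hlast : sldClass ((c :: rest.takeWhile (fun x => sldClass x == sldClass c)).getLast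
          (by simp)) = sldClass c := by
        have hmem := List.getLast_mem
          (l := c :: rest.takeWhile (fun x => sldClass x == sldClass c)) (by simp)
        rcases (List.mem_cons).1 hmem with h | h
        · rw [h]
        · exact hrunclass _ h
      have hstep2 := bLoop_canon (rest.dropWhile (fun x => sldClass x == sldClass c)).length
        (rest.dropWhile (fun x => sldClass x == sldClass c)) le_rfl
        (c :: rest.takeWhile (fun x => sldClass x == sldClass c))
        ((c :: rest.takeWhile (fun x => sldClass x == sldClass c)).getLast (by simp))
      rw [hlast] at hstep2
      rw [hstep2]
      have hcr : canonFrom c rest =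
          rest.takeWhile (fun x => sldClass x == sldClass c)
            ++ canonFrom ((c :: rest.takeWhile (fun x => sldClass x == sldClass c)).getLast
              (by simp)) (rest.dropWhile (fun x => sldClass x == sldClass c)) := by
        conv_lhs => rw [← List.takeWhile_append_dropWhile
          (p := fun x => sldClass x == sldClass c) (l := rest)]
        exact canon_run _ c _ hrunclass
      rw [hcr]
      simp [String.toList_ofList]
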